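-- pv_equiv track=rewrite | github.com/bzwei/wx_projector | src/utils/parsers.py | get_book_id
-- ===== SOURCE A (Python) =====
-- from typing import Optional, Dict, Tuple
--
-- def get_book_id(book_name: str, books_metadata: Dict[str, Tuple[int, int]]) -> Optional[int]:
--     """
--     Get book ID from book name
--
--     Args:
--         book_name: Book name (English or Chinese, case-insensitive)
--         books_metadata: Book metadata dict from load_books_metadata()
--
--     Returns:
--         Book ID, or None if not found
--     """
--     # Try exact match first (case-insensitive)
--     for name, (book_id, _) in books_metadata.items():
--         if name.lower() == book_name.lower():
--             return book_id
--
--     # Try partial match (English part or Chinese part)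
--     # Prioritize longer matches to avoid "John" matching "John1约翰一书" instead of "John约翰福音"
--     book_name_lower = book_name.lower()
--     matches = []
--
--     for name, (book_id, _) in books_metadata.items():
--         name_lower = name.lower()
--         # Check if book_name matches at start of this book name
--         if name_lower.startswith(book_name_lower):
--             matches.append((name, book_id))
--
--     # Sort by name length (shortest first) - prefer exact-like matches
--     if matches:
--         matches.sort(key=lambda x: len(x[0]))
--         return matches[0][1]
--
--     return None
-- ===== SOURCE B (Python) =====
-- from typing import Optional, Dict, Tuple
--
-- def get_book_id(book_name: str, books_metadata: Dict[str, Tuple[int, int]]) -> Optional[int]: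
--     """Exact case-insensitive match first, then shortest prefix match in one pass."""
--     target = book_name.lower()
--     for name, (book_id, _) in books_metadata.items():
--         if name.lower() == target:
--             return book_id
--
--     best_id = None
--     best_len = None
--     for name, (book_id, _) in books_metadata.items():
--         if name.lower().startswith(target) and (best_len is None or len(name) < best_len):
--             best_id, best_len = book_id, len(name)
--     return best_id
-- ===== Notes on version B (the rewrite author's own statement) =====
-- stated objective: faster
-- what changed: The prefix-match phase no longer builds the list of all matches and stable-sorts it by name length; a single pass keeps the current best (shortest) prefix match, using strict '<' so the first name among equal lengths wins exactly as the stable sort does.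
import Mathlib
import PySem

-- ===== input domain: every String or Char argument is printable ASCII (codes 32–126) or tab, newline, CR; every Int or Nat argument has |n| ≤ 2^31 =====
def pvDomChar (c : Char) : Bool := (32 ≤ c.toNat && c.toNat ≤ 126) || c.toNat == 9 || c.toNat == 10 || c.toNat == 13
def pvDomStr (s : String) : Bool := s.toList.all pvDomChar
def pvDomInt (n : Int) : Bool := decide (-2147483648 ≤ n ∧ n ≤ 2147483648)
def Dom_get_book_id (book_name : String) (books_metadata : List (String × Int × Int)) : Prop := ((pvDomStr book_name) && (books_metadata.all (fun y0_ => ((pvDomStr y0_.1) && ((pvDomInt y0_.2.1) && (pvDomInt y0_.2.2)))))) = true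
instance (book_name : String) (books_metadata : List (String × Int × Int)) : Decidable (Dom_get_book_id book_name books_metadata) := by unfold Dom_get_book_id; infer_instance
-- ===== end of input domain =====

-- B replaces A's collect-all-prefix-matches-then-stable-sort phase with a single pass that keeps the shortest prefix match; objective: faster (one O(n) scan instead of building and sorting a match list).


-- ===== PORT A =====
-- first loop of A: exact case-insensitive match, early return
def pvExactA (book_name : String) : List (String × Int × Int) → Option Int
  | [] => none
  | y :: rest =>
    if PySem.Str.lower y.1 = PySem.Str.lower book_name then some y.2.1
    else pvExactA book_name rest

def get_book_id (book_name : String) (books_metadata : List (String × Int × Int)) : Option Int :=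
  match pvExactA book_name books_metadata with
  | some bid => some bid
  | none =>
    let book_name_lower := PySem.Str.lower book_name
    let match_list := books_metadata.foldl
      (fun acc y =>
        if PySem.Str.startswith (PySem.Str.lower y.1) book_name_lower then acc ++ [(y.1, y.2.1)]
        else acc) []
    match PySem.List.sorted match_list (fun x => PySem.Str.len x.1) with
    | [] => none
    | m :: _ => some m.2

-- ===== PORT B =====
-- first loop of B: exact match against the precomputed lowered target
def pvExactB (target : String) : List (String × Int × Int) → Option Int
  | [] => none
  | y :: rest =>
    if PySem.Str.lower y.1 = target then some y.2.1
    else pvExactB target rest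

def get_book_id_alt (book_name : String) (books_metadata : List (String × Int × Int)) : Option Int :=
  let target := PySem.Str.lower book_name
  match pvExactB target books_metadata with
  | some bid => some bid
  | none =>
    (books_metadata.foldl
      (fun best y =>
        if PySem.Str.startswith (PySem.Str.lower y.1) target
            && (match best with
                | none => true
                | some p => decide (PySem.Str.len y.1 < p.2))
        then some (y.2.1, PySem.Str.len y.1)
        else best)
      (none : Option (Int × Int))).map Prod.fst

-- ===== PRECONDITION & SPEC =====
-- Pre_ excludes association lists with duplicate names: those do not represent any Python dict
-- (dict construction keeps only the last entry per key), so on them the Python programs and the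
-- list ports are run on different data; the corner is a representational artefact, not a behaviour of A.
def Pre_get_book_id (book_name : String) (books_metadata : List (String × Int × Int)) : Prop :=
  (books_metadata.map Prod.fst).Nodup
instance (book_name : String) (books_metadata : List (String × Int × Int)) : Decidable (Pre_get_book_id book_name books_metadata) := by unfold Pre_get_book_id; infer_instance

def pvWitness_get_book_id : String × (List (String × Int × Int)) :=
  ("jo", [("John", 43, 28), ("Job", 18, 42)])

def Spec_get_book_id (book_name : String) (books_metadata : List (String × Int × Int)) (out : Option Int) : Prop := out = get_book_id_alt book_name books_metadata
instance (book_name : String) (books_metadata : List (String × Int × Int)) (out : Option Int) : Decidable (Spec_get_book_id book_name books_metadata out) := by unfold Spec_get_book_id; infer_instance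

-- ===== CLAIM (what is proved, stated in full; the proofs are below) =====
def Claim_equal_get_book_id : Prop := ∀ (book_name : String) (books_metadata : List (String × Int × Int)), Dom_get_book_id book_name books_metadata → Pre_get_book_id book_name books_metadata → Spec_get_book_id book_name books_metadata (get_book_id book_name books_metadata)

-- ===== LEMMAS AND PROOFS =====

-- the two exact-match passes agree
theorem pvExact_eq (book_name : String) (md : List (String × Int × Int)) :
    pvExactB (PySem.Str.lower book_name) md = pvExactA book_name md := by
  induction md with
  | nil => rfl
  | cons y rest ih => simp [pvExactA, pvExactB, ih]

-- leftmost element of minimal key (ties go to the earlier element)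
def pvFm {α : Type} (key : α → Int) : List α → Option α
  | [] => none
  | x :: xs =>
    match pvFm key xs with
    | none => some x
    | some m => if key m < key x then some m else some x

-- one step of "keep the better of best-so-far and x"
def pvComb {α : Type} (key : α → Int) (o : Option α) (x : α) : Option α :=
  match o with
  | none => some x
  | some m => if key x < key m then some x else some m

theorem pvHead_insertBy {α : Type} (key : α → Int) (x : α) (acc : List α) :
    (PySem.List.insertBy (fun a b => decide (key a < key b)) x acc).head? =
      pvComb key acc.head? x := by
  cases acc with
  | nil => rfl
  | cons y ys =>
    simp only [PySem.List.insertBy, pvComb, List.head?]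
    split_ifs with h <;> simp_all

theorem pvHead_foldl_insertBy {α : Type} (key : α → Int) (ms : List α) (acc : List α) :
    (ms.foldl (fun acc x => PySem.List.insertBy (fun a b => decide (key a < key b)) x acc) acc).head? =
      ms.foldl (pvComb key) acc.head? := by
  induction ms generalizing acc with
  | nil => rfl
  | cons x ms ih => simp only [List.foldl_cons, ih, pvHead_insertBy]

theorem pvFm_cons_cons {α : Type} (key : α → Int) (p x : α) (ns : List α) :
    pvFm key (p :: x :: ns) =
      if key x < key p then pvFm key (x :: ns) else pvFm key (p :: ns) := by
  rcases hfm : pvFm key ns with _ | m <;>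
    simp only [pvFm, hfm] <;> split_ifs <;> simp only [] <;> (try split_ifs) <;>
      first | rfl | omega

theorem pvFoldl_comb_some {α : Type} (key : α → Int) (ns : List α) (p : α) :
    ns.foldl (pvComb key) (some p) = pvFm key (p :: ns) := by
  induction ns generalizing p with
  | nil => simp [pvFm]
  | cons x ns ih =>
    simp only [List.foldl_cons, pvComb]
    rw [pvFm_cons_cons]
    split_ifs with h
    · rw [ih x]
    · rw [ih p]

theorem pvFoldl_comb_none {α : Type} (key : α → Int) (ns : List α) :
    ns.foldl (pvComb key) none = pvFm key ns := by
  cases ns with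
  | nil => rfl
  | cons x ns => simpa [pvComb] using pvFoldl_comb_some key ns x

-- head of the stable sort is the leftmost element of minimal key
theorem pvHead_sorted {α : Type} (key : α → Int) (ms : List α) :
    (PySem.List.sorted ms key).head? = pvFm key ms := by
  rw [PySem.List.sorted_eq_foldl_insertBy, pvHead_foldl_insertBy]
  exact pvFoldl_comb_none key ms

theorem pvFm_map {α β : Type} (key : β → Int) (f : α → β) (l : List α) :
    pvFm key (l.map f) = (pvFm (fun x => key (f x)) l).map f := by
  induction l with
  | nil => rfl
  | cons x l ih =>
    simp only [List.map_cons, pvFm, ih]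
    rcases hfm : pvFm (fun x => key (f x)) l with _ | m <;> simp <;> split_ifs <;> rfl

-- B's single pass over the raw list equals the pvComb fold over the filtered, projected list
theorem pvB_fold_eq (t : String) (md : List (String × Int × Int)) (acc : Option (Int × Int)) :
    md.foldl
      (fun best y =>
        if PySem.Str.startswith (PySem.Str.lower y.1) t
            && (match best with
                | none => true
                | some p => decide (PySem.Str.len y.1 < p.2))
        then some (y.2.1, PySem.Str.len y.1)
        else best) acc =
    ((md.filter (fun y => PySem.Str.startswith (PySem.Str.lower y.1) t)).map
        (fun y => (y.2.1, PySem.Str.len y.1))).foldl (pvComb Prod.snd) acc := by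
  induction md generalizing acc with
  | nil => rfl
  | cons y md ih =>
    rw [List.foldl_cons, ih, List.filter_cons]
    cases hs : PySem.Str.startswith (PySem.Str.lower y.1) t with
    | true =>
      rw [if_pos rfl, List.map_cons, List.foldl_cons]
      congr 1
      cases acc with
      | none => simp [pvComb]
      | some p => simp [pvComb]
    | false =>
      rw [if_neg (by simp)]
      congr 1

-- ===== VERDICT (by name: the statement is the Claim_ definition above) =====
theorem get_book_id_spec : Claim_equal_get_book_id := by
  intro book_name md _ _
  unfold Spec_get_book_id get_book_id get_book_id_alt
  simp only [pvExact_eq]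
  cases hx : pvExactA book_name md with
  | some bid => rfl
  | none =>
    rw [PySem.List.foldl_append_if
          (fun y => PySem.Str.startswith (PySem.Str.lower y.1) (PySem.Str.lower book_name))
          (fun y => (y.1, y.2.1)) md [], List.nil_append]
    rw [pvB_fold_eq, pvFoldl_comb_none]
    generalize (md.filter fun y => PySem.Str.startswith (PySem.Str.lower y.1) (PySem.Str.lower book_name)) = L
    have hB : pvFm (Prod.snd : Int × Int → Int)
        (L.map (fun y => (y.2.1, PySem.Str.len y.1))) =
        (pvFm (fun y : String × Int × Int => PySem.Str.len y.1) L).map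
          (fun y => (y.2.1, PySem.Str.len y.1)) := pvFm_map _ _ _
    have hA : (PySem.List.sorted (L.map (fun y => (y.1, y.2.1))) (fun x => PySem.Str.len x.1)).head? =
        (pvFm (fun y : String × Int × Int => PySem.Str.len y.1) L).map
          (fun y => (y.1, y.2.1)) := by
      rw [pvHead_sorted]; exact pvFm_map _ _ _
    rw [hB]
    cases hfm : pvFm (fun y : String × Int × Int => PySem.Str.len y.1) L with
    | none =>
      rw [hfm] at hA
      cases hsort : PySem.List.sorted (L.map (fun y => (y.1, y.2.1))) (fun x => PySem.Str.len x.1) with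
      | nil => simp
      | cons m t => rw [hsort] at hA; simp at hA
    | some v =>
      rw [hfm] at hA
      cases hsort : PySem.List.sorted (L.map (fun y => (y.1, y.2.1))) (fun x => PySem.Str.len x.1) with
      | nil => rw [hsort] at hA; simp at hA
      | cons m t =>
        rw [hsort] at hA
        simp only [List.head?_cons, Option.map_some, Option.some.injEq] at hA
        subst hA
        simp
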